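-- pv_equiv track=rewrite | github.com/dnavaria/DataStructure-Algorithms | pyProblems/arrays/carry_forward/special_subsequence_ag.py | solve
-- ===== SOURCE A (Python) =====
-- def solve(A):
--     count_of_a = 0
--     pairs = 0
--     MOD = 1000*1000*1000 + 7
--     for i in range(len(A)):
--         if A[i] == "A":
--             count_of_a += 1
--         elif A[i] == "G":
--             pairs += count_of_a
--     return pairs % MOD
-- ===== SOURCE B (Python) =====
-- def solve(A):
--     MOD = 10**9 + 7
--     # pass 1: materialize prefix table; pre[i] = number of "A" in A[0..i-1]
--     pre = []
--     c = 0
--     for s in A: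
--         pre.append(c)
--         if s == "A":
--             c += 1
--     # pass 2: separate scan consuming the table
--     total = 0
--     for i in range(len(A)):
--         if A[i] == "G":
--             total += pre[i]
--     return total % MOD
-- ===== Notes on version B (the rewrite author's own statement) =====
-- stated objective: alternative
-- what changed: Replaces the single interleaved counter loop by two separate passes: first build a prefix table of 'A' counts, then a second scan that sums the table entries at the 'G' positions before taking the modulus.
import Mathlib
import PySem

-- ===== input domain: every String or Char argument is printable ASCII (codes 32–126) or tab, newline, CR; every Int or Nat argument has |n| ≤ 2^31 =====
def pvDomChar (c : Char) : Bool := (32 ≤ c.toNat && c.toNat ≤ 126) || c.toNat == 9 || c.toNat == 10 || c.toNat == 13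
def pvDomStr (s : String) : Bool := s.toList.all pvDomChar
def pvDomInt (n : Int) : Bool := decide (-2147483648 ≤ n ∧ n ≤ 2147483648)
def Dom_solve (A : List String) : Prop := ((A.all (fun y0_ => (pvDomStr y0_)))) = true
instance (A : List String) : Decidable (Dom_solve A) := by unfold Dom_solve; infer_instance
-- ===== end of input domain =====

-- B builds a prefix table of 'A' counts in one pass and sums it at 'G' positions in a second pass; A's single interleaved loop is replaced (same cost, different decomposition).

-- ===== PORT A =====
-- the single interleaved loop: state (count_of_a, pairs)
def solveLoop : List String → Int → Int → Int
  | [], _, pairs => pairs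
  | s :: rest, c, pairs =>
    if s = "A" then solveLoop rest (c + 1) pairs
    else if s = "G" then solveLoop rest c (pairs + c)
    else solveLoop rest c pairs

def solve (A : List String) : Int :=
  PySem.Int.mod (solveLoop A 0 0) (1000 * 1000 * 1000 + 7)

-- ===== PORT B =====
-- pass 1 of Source B: the prefix table (pre[i] = number of "A" before index i)
def preTable : List String → Int → List Int
  | [], _ => []
  | s :: rest, c => c :: preTable rest (if s = "A" then c + 1 else c)

-- pass 2 of Source B: sum pre[i] over the "G" positions (indices paired with table entries)
def sumG : List (String × Int) → Int → Int
  | [], total => total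
  | (s, p) :: rest, total => sumG rest (if s = "G" then total + p else total)

def solve_alt (A : List String) : Int :=
  PySem.Int.mod (sumG (A.zip (preTable A 0)) 0) (10 ^ 9 + 7)

-- ===== PRECONDITION & SPEC =====
def Spec_solve (A : List String) (out : Int) : Prop := out = solve_alt A
instance (A : List String) (out : Int) : Decidable (Spec_solve A out) := by unfold Spec_solve; infer_instance

-- ===== CLAIM (what is proved, stated in full; the proofs are below) =====
def Claim_equal_solve : Prop := ∀ (A : List String), Dom_solve A → Spec_solve A (solve A)

-- ===== LEMMAS AND PROOFS =====
theorem solveLoop_eq_sumG (A : List String) : ∀ (c pairs : Int),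
    solveLoop A c pairs = sumG (A.zip (preTable A c)) pairs := by
  induction A with
  | nil => intro c pairs; rfl
  | cons s rest ih =>
    intro c pairs
    by_cases hA : s = "A"
    · simp [solveLoop, preTable, sumG, hA, ih]
    · by_cases hG : s = "G"
      · simp [solveLoop, preTable, sumG, hG, ih]
      · simp [solveLoop, preTable, sumG, hA, hG, ih]

-- ===== VERDICT (by name: the statement is the Claim_ definition above) =====
theorem solve_spec : Claim_equal_solve := by
  intro A _
  unfold Spec_solve solve solve_alt
  rw [solveLoop_eq_sumG]
  norm_num
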